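-- pv_equiv track=rewrite | github.com/wdragondragon/JavaDependencyUML | dependency_closure.py | collect_dependencies
-- ===== SOURCE A (Python) =====
-- def collect_dependencies(root_classes, edges):
--     if not root_classes:
--         return set(), set()
--
--     visited = set()
--     result_edges = set()
--
--     refs = {}
--     iface_impls = {}
--
--     for a, b, t in edges:
--         refs.setdefault(a, set()).add((b, t))
--         if t in ("implements", "extends") and "Exception" not in b:
--             iface_impls.setdefault(b, set()).add(a)
--
--     def dfs(node):
--         if node in visited:
--             return
--         visited.add(node)
--
--         for b, t in refs.get(node, []):
--             result_edges.add((node, b, t))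
--             dfs(b)
--
--             if t == "field" and b in iface_impls:
--                 for impl in iface_impls[b]:
--                     dfs(impl)
--
--     for root in root_classes:
--         dfs(root)
--
--     return visited, result_edges
-- ===== SOURCE B (Python) =====
-- def collect_dependencies(root_classes, edges):
--     if not root_classes:
--         return set(), set()
--
--     refs = {}
--     iface_impls = {}
--     for a, b, t in edges:
--         refs.setdefault(a, set()).add((b, t))
--         if t in ("implements", "extends") and "Exception" not in b:
--             iface_impls.setdefault(b, set()).add(a)
--
--     visited = set()
--     result_edges = set()
--
--     # iterative DFS over an explicit task stack (no recursion)
--     stack = [("visit", r) for r in root_classes][::-1]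
--     while stack:
--         task = stack.pop()
--         if task[0] == "emit":
--             result_edges.add(task[1])
--             continue
--         node = task[1]
--         if node in visited:
--             continue
--         visited.add(node)
--         pending = []
--         for b, t in refs.get(node, []):
--             pending.append(("emit", (node, b, t)))
--             pending.append(("visit", b))
--             if t == "field" and b in iface_impls:
--                 pending.extend(("visit", impl) for impl in iface_impls[b])
--         stack.extend(reversed(pending))
--
--     return visited, result_edges
-- ===== Notes on version B (the rewrite author's own statement) =====
-- stated objective: alternative
-- what changed: The recursive closure dfs (which can hit Python's recursion limit on deep dependency chains) is replaced by an iterative DFS driven by an explicit stack of visit/emit tasks; the index-building pass is unchanged.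
import Mathlib
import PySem

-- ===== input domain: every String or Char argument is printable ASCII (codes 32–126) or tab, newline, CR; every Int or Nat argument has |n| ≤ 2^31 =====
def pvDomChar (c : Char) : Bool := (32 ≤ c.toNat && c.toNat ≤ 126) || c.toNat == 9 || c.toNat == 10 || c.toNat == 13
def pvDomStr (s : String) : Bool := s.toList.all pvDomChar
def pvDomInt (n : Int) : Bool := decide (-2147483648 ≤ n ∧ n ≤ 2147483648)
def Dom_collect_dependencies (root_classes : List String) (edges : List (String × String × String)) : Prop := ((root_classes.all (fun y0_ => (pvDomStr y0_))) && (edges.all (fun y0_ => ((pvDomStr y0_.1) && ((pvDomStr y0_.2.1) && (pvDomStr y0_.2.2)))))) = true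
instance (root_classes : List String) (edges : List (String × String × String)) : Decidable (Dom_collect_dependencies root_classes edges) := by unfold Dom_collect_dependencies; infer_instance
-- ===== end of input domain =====

-- B replaces A's recursive dfs by an iterative DFS over an explicit stack of visit/emit tasks
-- (same visiting order, no recursion); objective: alternative decomposition, same cost.
-- Both Python versions iterate over Python sets (refs[node], iface_impls[b]); the returned
-- SETS do not depend on that hash iteration order, and the ports iterate them in insertion order.


-- state threaded by both versions: (visited, result_edges), both Python sets
abbrev PvSt := PySem.Set String × PySem.Set (String × String × String)

-- shared index-building pass (identical in Source A and Source B):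
-- refs.setdefault(a,set()).add((b,t)) and the interface/implements index with the 'Exception' filter
def pvBuild (edges : List (String × String × String)) :
    PySem.Dict String (PySem.Set (String × String)) × PySem.Dict String (PySem.Set String) :=
  edges.foldl
    (fun acc e =>
      let refs := acc.1.insert e.1 (PySem.Set.add (acc.1.getD e.1 PySem.Set.empty) (e.2.1, e.2.2))
      let ifs :=
        if (e.2.2 == "implements" || e.2.2 == "extends") && !(PySem.Str.isIn "Exception" e.2.1) then
          acc.2.insert e.2.1 (PySem.Set.add (acc.2.getD e.2.1 PySem.Set.empty) e.1)
        else acc.2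
      (refs, ifs))
    (PySem.Dict.empty, PySem.Dict.empty)

-- ===== PORT A =====
-- A's recursive dfs. The Nat argument is pure termination fuel (1 unit per dfs entry and per
-- edge-emission); the 'min q g' clamps exist only for the termination measure and never change
-- the value on actual runs (gas only decreases: pvDfsA_fst_le below).
def pvDfsA (refs : PySem.Dict String (PySem.Set (String × String)))
    (ifs : PySem.Dict String (PySem.Set String)) :
    Nat → String → PvSt → Nat × PvSt
  | 0, _, st => (0, st)
  | g+1, node, st =>
    if PySem.Set.contains st.1 node then (g, st)
    else
      (PySem.Dict.getD refs node PySem.Set.empty).foldl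
        (fun acc bt =>
          match acc with
          | (0, st) => (0, st)
          | (q+1, st) =>
            let st : PvSt := (st.1, PySem.Set.add st.2 (node, bt.1, bt.2))
            let r := pvDfsA refs ifs (min q g) bt.1 st
            if bt.2 == "field" && (PySem.Dict.get? ifs bt.1).isSome then
              (PySem.Dict.getD ifs bt.1 PySem.Set.empty).foldl
                (fun acc2 impl => pvDfsA refs ifs (min acc2.1 g) impl acc2.2) r
            else r)
        (g, (PySem.Set.add st.1 node, st.2))
termination_by g => g
decreasing_by all_goals omega

-- fuel actually used is ≤ roots + 2*|edges| + |edges|^2 (one unit per task); this bound is generous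
def pvFuel (root_classes : List String) (edges : List (String × String × String)) : Nat :=
  root_classes.length + 2 * edges.length + edges.length * edges.length + 2

def collect_dependencies (root_classes : List String) (edges : List (String × String × String)) :
    List String × (List (String × String × String)) :=
  if root_classes.isEmpty then ([], [])
  else
    let idx := pvBuild edges
    let p := root_classes.foldl
      (fun acc r => pvDfsA idx.1 idx.2 acc.1 r acc.2)
      (pvFuel root_classes edges, (PySem.Set.empty, PySem.Set.empty))
    (p.2.1, p.2.2)

-- ===== PORT B =====
-- Source B's task stack: ("visit", n) / ("emit", (a,b,t)).  The Lean list's head is the stack top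
-- (Source B pushes 'reversed(pending)' and pops from the end, i.e. processes pending in order,
-- which is exactly prepending 'pending' to a head-is-top list).
inductive PvTask : Type
  | visit : String → PvTask
  | emit : String → String → String → PvTask
deriving DecidableEq, Repr

-- the 'pending' list Source B builds for a freshly visited node
def pvExp (refs : PySem.Dict String (PySem.Set (String × String)))
    (ifs : PySem.Dict String (PySem.Set String)) (node : String) : List PvTask :=
  (PySem.Dict.getD refs node PySem.Set.empty).foldl
    (fun acc bt =>
      acc ++ [PvTask.emit node bt.1 bt.2, PvTask.visit bt.1] ++
        (if bt.2 == "field" && (PySem.Dict.get? ifs bt.1).isSome then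
          (PySem.Dict.getD ifs bt.1 PySem.Set.empty).map PvTask.visit
        else []))
    []

-- Source B's while loop; the Nat argument is pure termination fuel (1 unit per pop), never
-- exhausted on an actual run (≤ pvFuel tasks ever get popped)
def pvRunB (refs : PySem.Dict String (PySem.Set (String × String)))
    (ifs : PySem.Dict String (PySem.Set String)) :
    Nat → List PvTask → PvSt → PvSt
  | _, [], st => st
  | 0, _ :: _, st => st
  | g+1, PvTask.emit a b t :: rest, st => pvRunB refs ifs g rest (st.1, PySem.Set.add st.2 (a, b, t))
  | g+1, PvTask.visit n :: rest, st =>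
    if PySem.Set.contains st.1 n then pvRunB refs ifs g rest st
    else pvRunB refs ifs g (pvExp refs ifs n ++ rest) (PySem.Set.add st.1 n, st.2)

def collect_dependencies_alt (root_classes : List String) (edges : List (String × String × String)) :
    List String × (List (String × String × String)) :=
  if root_classes.isEmpty then ([], [])
  else
    let idx := pvBuild edges
    let st := pvRunB idx.1 idx.2 (pvFuel root_classes edges)
      (root_classes.map PvTask.visit) (PySem.Set.empty, PySem.Set.empty)
    (st.1, st.2)

-- ===== PRECONDITION & SPEC =====
def Spec_collect_dependencies (root_classes : List String) (edges : List (String × String × String)) (out : List String × (List (String × String × String))) : Prop := out = collect_dependencies_alt root_classes edges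
instance (root_classes : List String) (edges : List (String × String × String)) (out : List String × (List (String × String × String))) : Decidable (Spec_collect_dependencies root_classes edges out) := by unfold Spec_collect_dependencies; infer_instance

-- ===== CLAIM (what is proved, stated in full; the proofs are below) =====
def Claim_equal_collect_dependencies : Prop := ∀ (root_classes : List String) (edges : List (String × String × String)), Dom_collect_dependencies root_classes edges → Spec_collect_dependencies root_classes edges (collect_dependencies root_classes edges)

-- ===== LEMMAS AND PROOFS =====

-- A-side semantics of a task list: fold A's dfs / edge-emission over it, threading (gas, state)
def pvRunTasks (refs : PySem.Dict String (PySem.Set (String × String)))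
    (ifs : PySem.Dict String (PySem.Set String))
    (tasks : List PvTask) (p : Nat × PvSt) : Nat × PvSt :=
  tasks.foldl
    (fun acc task =>
      match task with
      | PvTask.emit a b t =>
        match acc with
        | (0, st) => (0, st)
        | (q+1, st) => (q, (st.1, PySem.Set.add st.2 (a, b, t)))
      | PvTask.visit n => pvDfsA refs ifs acc.1 n acc.2) p

-- gas only decreases (generic fold form)
theorem pv_foldl_fst_le {a s : Type} (F : Nat × s → a → Nat × s)
    (h : ∀ p x, (F p x).1 ≤ p.1) (l : List a) (p : Nat × s) :
    (l.foldl F p).1 ≤ p.1 := by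
  induction l generalizing p with
  | nil => exact le_refl _
  | cons x l ih => exact le_trans (ih (F p x)) (h p x)

theorem pvDfsA_fst_le (refs : PySem.Dict String (PySem.Set (String × String)))
    (ifs : PySem.Dict String (PySem.Set String)) (g : Nat) (n : String) (st : PvSt) :
    (pvDfsA refs ifs g n st).1 ≤ g := by
  induction g using Nat.strong_induction_on generalizing n st with
  | _ g ih =>
    match g with
    | 0 => simp [pvDfsA]
    | g+1 =>
      rw [pvDfsA]
      split
      · omega
      · refine le_trans (pv_foldl_fst_le _ ?_ _ _) (by omega)
        intro p bt
        match p with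
        | (0, st) => simp
        | (q+1, st) =>
          simp only
          split
          · refine le_trans (pv_foldl_fst_le _ ?_ _ _) ?_
            · intro p2 impl
              exact le_trans (ih _ (by omega) _ _) (min_le_left _ _)
            · exact le_trans (le_trans (ih _ (by omega) _ _) (min_le_left _ _)) (by omega)
          · exact le_trans (le_trans (ih _ (by omega) _ _) (min_le_left _ _)) (by omega)

-- frozen at gas 0
theorem pvRunTasks_zero (refs : PySem.Dict String (PySem.Set (String × String)))
    (ifs : PySem.Dict String (PySem.Set String)) (tasks : List PvTask) (st : PvSt) :
    pvRunTasks refs ifs tasks (0, st) = (0, st) := by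
  induction tasks with
  | nil => rfl
  | cons t tasks ih =>
    match t with
    | PvTask.emit a b c => simpa [pvRunTasks] using ih
    | PvTask.visit n => simpa [pvRunTasks, pvDfsA] using ih

theorem pvRunTasks_fst_le (refs : PySem.Dict String (PySem.Set (String × String)))
    (ifs : PySem.Dict String (PySem.Set String)) (tasks : List PvTask) (p : Nat × PvSt) :
    (pvRunTasks refs ifs tasks p).1 ≤ p.1 := by
  refine pv_foldl_fst_le _ ?_ tasks p
  intro q task
  match task with
  | PvTask.visit n => exact pvDfsA_fst_le refs ifs q.1 n q.2
  | PvTask.emit a b t =>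
    match q with
    | (0, st) => simp
    | (q+1, st) => simp

-- appending task lists composes their A-side semantics
theorem pvRunTasks_append (refs : PySem.Dict String (PySem.Set (String × String)))
    (ifs : PySem.Dict String (PySem.Set String)) (l1 l2 : List PvTask) (p : Nat × PvSt) :
    pvRunTasks refs ifs (l1 ++ l2) p = pvRunTasks refs ifs l2 (pvRunTasks refs ifs l1 p) := by
  simp [pvRunTasks, List.foldl_append]

-- the clamp 'min acc.1 g' in A's implements-expansion loop is the identity while gas stays ≤ g
theorem pv_impls_fold_min (refs : PySem.Dict String (PySem.Set (String × String)))
    (ifs : PySem.Dict String (PySem.Set String)) (g : Nat) (l : List String)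
    (p : Nat × PvSt) (hp : p.1 ≤ g) :
    l.foldl (fun acc2 impl => pvDfsA refs ifs (min acc2.1 g) impl acc2.2) p
      = l.foldl (fun acc2 impl => pvDfsA refs ifs acc2.1 impl acc2.2) p := by
  induction l generalizing p with
  | nil => rfl
  | cons impl l ih =>
    simp only [List.foldl_cons, Nat.min_eq_left hp]
    exact ih _ (le_trans (pvDfsA_fst_le refs ifs p.1 impl p.2) hp)

-- the A-side semantics of the visit tasks of a list of implementations is A's dfs fold over it
theorem pvRunTasks_map_visit (refs : PySem.Dict String (PySem.Set (String × String)))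
    (ifs : PySem.Dict String (PySem.Set String)) (l : List String) (p : Nat × PvSt) :
    pvRunTasks refs ifs (l.map PvTask.visit) p
      = l.foldl (fun acc impl => pvDfsA refs ifs acc.1 impl acc.2) p := by
  simp [pvRunTasks, List.foldl_map]

-- A's neighbour loop (body of dfs on a fresh node) computes exactly the A-side semantics of
-- the pending-task list Source B pushes for that node
theorem pvExp_spec (refs : PySem.Dict String (PySem.Set (String × String)))
    (ifs : PySem.Dict String (PySem.Set String)) (node : String) (g : Nat)
    (nbrs : List (String × String)) (p : Nat × PvSt) (hp : p.1 ≤ g) :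
    nbrs.foldl
      (fun acc bt =>
        match acc with
        | (0, st) => (0, st)
        | (q+1, st) =>
          let st : PvSt := (st.1, PySem.Set.add st.2 (node, bt.1, bt.2))
          let r := pvDfsA refs ifs (min q g) bt.1 st
          if bt.2 == "field" && (PySem.Dict.get? ifs bt.1).isSome then
            (PySem.Dict.getD ifs bt.1 PySem.Set.empty).foldl
              (fun acc2 impl => pvDfsA refs ifs (min acc2.1 g) impl acc2.2) r
          else r) p
    = pvRunTasks refs ifs
        (nbrs.foldl
          (fun acc bt =>
            acc ++ [PvTask.emit node bt.1 bt.2, PvTask.visit bt.1] ++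
              (if bt.2 == "field" && (PySem.Dict.get? ifs bt.1).isSome then
                (PySem.Dict.getD ifs bt.1 PySem.Set.empty).map PvTask.visit
              else [])) [])
        p := by
  induction nbrs generalizing p with
  | nil => simp [pvRunTasks]
  | cons bt nbrs ih =>
    conv_rhs => rw [funext (fun acc => funext (fun bt : String × String => List.append_assoc acc
      [PvTask.emit node bt.1 bt.2, PvTask.visit bt.1]
      (if bt.2 == "field" && (PySem.Dict.get? ifs bt.1).isSome then
        (PySem.Dict.getD ifs bt.1 PySem.Set.empty).map PvTask.visit else [])))]
    rw [PySem.List.foldl_append_eq_flatMap, List.flatMap_cons, List.nil_append]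
    have hback := PySem.List.foldl_append_eq_flatMap
      (fun bt : String × String =>
        [PvTask.emit node bt.1 bt.2, PvTask.visit bt.1] ++
          (if bt.2 == "field" && (PySem.Dict.get? ifs bt.1).isSome then
            (PySem.Dict.getD ifs bt.1 PySem.Set.empty).map PvTask.visit
          else [])) nbrs ([] : List PvTask)
    rw [List.nil_append] at hback
    simp only [← List.append_assoc] at hback
    rw [pvRunTasks_append, List.foldl_cons, ← hback]
    -- head block: emit + visit + optional implementation visits
    obtain ⟨q, st⟩ := p
    match q with
    | 0 =>
      rw [pvRunTasks_zero]
      exact ih (0, st) (Nat.zero_le g)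
    | q+1 =>
      have hq : q ≤ g := by omega
      have hhead :
          (match ((q+1 : Nat), st) with
            | (0, st) => ((0 : Nat), st)
            | (q+1, st) =>
              let st : PvSt := (st.1, PySem.Set.add st.2 (node, bt.1, bt.2))
              let r := pvDfsA refs ifs (min q g) bt.1 st
              if bt.2 == "field" && (PySem.Dict.get? ifs bt.1).isSome then
                (PySem.Dict.getD ifs bt.1 PySem.Set.empty).foldl
                  (fun acc2 impl => pvDfsA refs ifs (min acc2.1 g) impl acc2.2) r
              else r)
          = pvRunTasks refs ifs
              ([PvTask.emit node bt.1 bt.2, PvTask.visit bt.1] ++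
                (if bt.2 == "field" && (PySem.Dict.get? ifs bt.1).isSome then
                  (PySem.Dict.getD ifs bt.1 PySem.Set.empty).map PvTask.visit
                else [])) ((q+1 : Nat), st) := by
        rw [pvRunTasks_append]
        have h2 : pvRunTasks refs ifs [PvTask.emit node bt.1 bt.2, PvTask.visit bt.1] ((q+1 : Nat), st)
            = pvDfsA refs ifs q bt.1 (st.1, PySem.Set.add st.2 (node, bt.1, bt.2)) := rfl
        rw [h2]
        simp only [Nat.min_eq_left hq]
        split
        · rw [pvRunTasks_map_visit,
            pv_impls_fold_min refs ifs g _ _ (le_trans (pvDfsA_fst_le refs ifs q _ _) hq)]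
        · rfl
      rw [hhead]
      refine ih _ ?_
      rw [← hhead]
      simp only
      split
      · exact le_trans (le_trans (pv_foldl_fst_le _
          (fun p2 impl => le_trans (pvDfsA_fst_le refs ifs _ _ _) (min_le_left _ _)) _ _)
          (le_trans (pvDfsA_fst_le refs ifs _ _ _) (min_le_left _ _))) (by omega)
      · exact le_trans (le_trans (pvDfsA_fst_le refs ifs _ _ _) (min_le_left _ _)) (by omega)

-- Source B's machine at gas 0 is frozen
theorem pvRunB_zero (refs : PySem.Dict String (PySem.Set (String × String)))
    (ifs : PySem.Dict String (PySem.Set String)) (l : List PvTask) (st : PvSt) :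
    pvRunB refs ifs 0 l st = st := by
  cases l <;> rfl

-- the simulation: running Source B's machine on tasks ++ rest first runs A's semantics of tasks
theorem pvSim (refs : PySem.Dict String (PySem.Set (String × String)))
    (ifs : PySem.Dict String (PySem.Set String)) (g : Nat) (tasks rest : List PvTask) (st : PvSt) :
    pvRunB refs ifs g (tasks ++ rest) st =
      pvRunB refs ifs (pvRunTasks refs ifs tasks (g, st)).1 rest
        (pvRunTasks refs ifs tasks (g, st)).2 := by
  induction g using Nat.strong_induction_on generalizing tasks rest st with
  | _ g ih =>
    match tasks with
    | [] => rfl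
    | task :: ts =>
      match g with
      | 0 =>
        rw [pvRunTasks_zero, pvRunB_zero, pvRunB_zero]
      | g+1 =>
        match task with
        | PvTask.emit a b t =>
          have hstep : pvRunTasks refs ifs (PvTask.emit a b t :: ts) ((g+1 : Nat), st)
              = pvRunTasks refs ifs ts (g, (st.1, PySem.Set.add st.2 (a, b, t))) := rfl
          rw [hstep, List.cons_append, pvRunB]
          exact ih g (by omega) ts rest _
        | PvTask.visit n =>
          have hstep : pvRunTasks refs ifs (PvTask.visit n :: ts) ((g+1 : Nat), st)
              = pvRunTasks refs ifs ts (pvDfsA refs ifs (g+1) n st) := rfl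
          rw [hstep, List.cons_append, pvRunB]
          by_cases hv : PySem.Set.contains st.1 n
          · rw [if_pos hv]
            have hd : pvDfsA refs ifs (g+1) n st = (g, st) := by
              rw [pvDfsA, if_pos hv]
            rw [hd]
            exact ih g (by omega) ts rest st
          · rw [if_neg hv]
            have hd : pvDfsA refs ifs (g+1) n st
                = pvRunTasks refs ifs (pvExp refs ifs n) (g, (PySem.Set.add st.1 n, st.2)) := by
              rw [pvDfsA, if_neg hv]
              exact pvExp_spec refs ifs n g _ _ (le_refl g)
            rw [hd]
            rw [ih g (by omega) (pvExp refs ifs n) (ts ++ rest) _]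
            have hle : (pvRunTasks refs ifs (pvExp refs ifs n) (g, (PySem.Set.add st.1 n, st.2))).1 ≤ g :=
              pvRunTasks_fst_le refs ifs _ _
            rw [ih (pvRunTasks refs ifs (pvExp refs ifs n) (g, (PySem.Set.add st.1 n, st.2))).1
              (Nat.lt_succ_of_le hle) ts rest
              (pvRunTasks refs ifs (pvExp refs ifs n) (g, (PySem.Set.add st.1 n, st.2))).2]

-- ===== VERDICT (by name: the statement is the Claim_ definition above) =====
theorem collect_dependencies_spec : Claim_equal_collect_dependencies := by
  intro root_classes edges _
  unfold Spec_collect_dependencies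
  cases hre : root_classes.isEmpty
  case true => simp [collect_dependencies, collect_dependencies_alt, hre]
  case false =>
    have hsim := pvSim (pvBuild edges).1 (pvBuild edges).2 (pvFuel root_classes edges)
      (root_classes.map PvTask.visit) [] (PySem.Set.empty, PySem.Set.empty)
    rw [List.append_nil] at hsim
    simp only [collect_dependencies, collect_dependencies_alt, hre, Bool.false_eq_true,
      if_false, hsim]
    rw [show ∀ p : Nat × PvSt, pvRunB (pvBuild edges).1 (pvBuild edges).2 p.1 [] p.2 = p.2
      from fun p => by cases p.1 <;> rfl]
    rw [pvRunTasks_map_visit]
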